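-- pv_equiv track=rewrite | github.com/ASharma1406/ProdGuard_PLC_-_Decline_Risk_Monitoring | code/PLC_prediction_and_Decline_Analysis.py | time_since_last_peak
-- ===== SOURCE A (Python) =====
-- def time_since_last_peak(is_peak_series):
--     counter = 0
--     result = []
--     for is_peak in is_peak_series:
--         if is_peak == 1:
--             counter = 0
--         else:
--             counter += 1
--         result.append(counter)
--     return result
-- ===== SOURCE B (Python) =====
-- def time_since_last_peak(is_peak_series):
--     if 1 in is_peak_series:
--         p = is_peak_series.index(1)
--         return list(range(1, p + 1)) + [0] + time_since_last_peak(is_peak_series[p + 1:])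
--     return list(range(1, len(is_peak_series) + 1))
-- ===== Notes on version B (the rewrite author's own statement) =====
-- stated objective: alternative
-- what changed: B replaces A's element-by-element reset counter with a divide-and-conquer on peaks: it locates the first peak with index, emits the whole pre-peak segment as range(1, p + 1) followed by a single zero, and recurses on the suffix after the peak; a peak-free list is emitted as one range.
import Mathlib
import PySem

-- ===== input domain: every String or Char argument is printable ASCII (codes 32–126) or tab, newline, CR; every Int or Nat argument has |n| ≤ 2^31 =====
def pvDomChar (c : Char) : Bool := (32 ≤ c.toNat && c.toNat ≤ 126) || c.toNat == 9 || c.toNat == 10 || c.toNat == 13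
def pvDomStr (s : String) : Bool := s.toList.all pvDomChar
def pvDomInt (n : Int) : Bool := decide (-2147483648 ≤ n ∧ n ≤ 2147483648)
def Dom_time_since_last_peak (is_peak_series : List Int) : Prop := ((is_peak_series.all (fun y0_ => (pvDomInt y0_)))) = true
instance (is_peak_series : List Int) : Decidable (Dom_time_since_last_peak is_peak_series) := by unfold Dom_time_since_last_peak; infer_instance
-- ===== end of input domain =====

-- B replaces A's per-element reset counter by a divide-and-conquer on peaks: locate the
-- first peak, emit the pre-peak segment as a range plus [0], recurse on the suffix (objective: alternative).

-- ===== PORT A =====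
-- counter resets to 0 on a peak, otherwise increments; each counter value is appended.
def time_since_last_peak (is_peak_series : List Int) : List Int :=
  (is_peak_series.foldl
    (fun (st : Int × List Int) is_peak =>
      let counter := if is_peak == 1 then 0 else st.1 + 1
      (counter, st.2 ++ [counter]))
    (0, [])).2

-- ===== PORT B =====
-- '1 in xs' + 'xs.index(1)' ported together as index? (some ↔ membership);
-- range(1, p+1), [0], recursive call on xs[p+1:]; peak-free case is range(1, len+1).
def time_since_last_peak_alt (is_peak_series : List Int) : List Int :=
  match h : PySem.List.index? is_peak_series 1 with
  | some p =>
      PySem.List.pyRange 1 ((p : Int) + 1) 1 ++ [0] ++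
        time_since_last_peak_alt (PySem.List.slice is_peak_series (some ((p : Int) + 1)) none)
  | none => PySem.List.pyRange 1 ((is_peak_series.length : Int) + 1) 1
termination_by is_peak_series.length
decreasing_by
  have hmem : (1 : Int) ∈ is_peak_series :=
    (PySem.List.index?_isSome_iff is_peak_series 1).mp (by rw [h]; rfl)
  have hpos : 0 < is_peak_series.length := List.length_pos_of_mem hmem
  have : PySem.List.slice is_peak_series (some ((p : Int) + 1)) none
      = is_peak_series.drop (p + 1) := by
    have : ((p : Int) + 1) = ((p + 1 : Nat) : Int) := by push_cast; ring
    rw [this, PySem.List.slice_from_natCast]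
  rw [this]
  simp only [List.length_drop]
  omega

-- ===== PRECONDITION & SPEC =====
def Spec_time_since_last_peak (is_peak_series : List Int) (out : List Int) : Prop := out = time_since_last_peak_alt is_peak_series
instance (is_peak_series : List Int) (out : List Int) : Decidable (Spec_time_since_last_peak is_peak_series out) := by unfold Spec_time_since_last_peak; infer_instance

-- ===== CLAIM (what is proved, stated in full; the proofs are below) =====
def Claim_equal_time_since_last_peak : Prop := ∀ (is_peak_series : List Int), Dom_time_since_last_peak is_peak_series → Spec_time_since_last_peak is_peak_series (time_since_last_peak is_peak_series)

-- ===== LEMMAS AND PROOFS =====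

-- Reference recursion: the counter stream A produces, as a simple structural recursion.
def tslpGo (c : Int) : List Int → List Int
  | [] => []
  | x :: xs => if x = 1 then 0 :: tslpGo 0 xs else (c + 1) :: tslpGo (c + 1) xs

-- A's fold equals acc ++ tslpGo c xs.
theorem tslp_fold_eq_go (xs : List Int) : ∀ (c : Int) (acc : List Int),
    (xs.foldl
      (fun (st : Int × List Int) is_peak =>
        let counter := if is_peak == 1 then 0 else st.1 + 1
        (counter, st.2 ++ [counter]))
      (c, acc)).2 = acc ++ tslpGo c xs := by
  induction xs with
  | nil => intro c acc; simp [tslpGo]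
  | cons x xs ih =>
    intro c acc
    simp only [List.foldl_cons]
    by_cases hx : x = 1
    · have := ih 0 (acc ++ [0])
      simpa [hx, tslpGo] using this
    · have := ih (c + 1) (acc ++ [c + 1])
      simpa [hx, tslpGo] using this

-- On a peak-free list the counter stream is a range.
theorem tslpGo_no_peak (xs : List Int) : ∀ (c : Int), (1 : Int) ∉ xs →
    tslpGo c xs = PySem.List.pyRange (c + 1) (c + 1 + xs.length) 1 := by
  induction xs with
  | nil => intro c _; simp [tslpGo, PySem.List.pyRange_one_eq_nil]
  | cons x xs ih =>
    intro c hmem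
    have hx : x ≠ 1 := fun h => hmem (h ▸ List.mem_cons_self ..)
    have htail : (1 : Int) ∉ xs := fun h => hmem (List.mem_cons_of_mem _ h)
    rw [tslpGo, if_neg hx, ih (c + 1) htail,
      PySem.List.pyRange_one_cons (a := c + 1) (by simp)]
    simp only [List.length_cons]
    push_cast
    ring_nf
-- The counter stream splits at the first peak.
theorem tslpGo_split (pre : List Int) : ∀ (c : Int) (rest : List Int), (1 : Int) ∉ pre →
    tslpGo c (pre ++ 1 :: rest)
      = PySem.List.pyRange (c + 1) (c + 1 + pre.length) 1 ++ 0 :: tslpGo 0 rest := by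
  induction pre with
  | nil => intro c rest _; simp [tslpGo, PySem.List.pyRange_one_eq_nil]
  | cons x pre ih =>
    intro c rest hmem
    have hx : x ≠ 1 := fun h => hmem (h ▸ List.mem_cons_self ..)
    have htail : (1 : Int) ∉ pre := fun h => hmem (List.mem_cons_of_mem _ h)
    rw [List.cons_append, tslpGo, if_neg hx, ih (c + 1) rest htail,
      PySem.List.pyRange_one_cons (a := c + 1) (by simp)]
    simp only [List.cons_append, List.length_cons]
    push_cast
    ring_nf

-- B equals the counter stream, by strong induction on the length.
theorem tslp_alt_eq_go (n : Nat) : ∀ (xs : List Int), xs.length ≤ n →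
    time_since_last_peak_alt xs = tslpGo 0 xs := by
  induction n with
  | zero =>
    intro xs hlen
    have hnil : xs = [] := List.eq_nil_of_length_eq_zero (Nat.le_zero.mp hlen)
    subst hnil
    rw [time_since_last_peak_alt]
    simp [tslpGo, PySem.List.index?_eq_idxOf?, PySem.List.pyRange_one_eq_nil]
  | succ n ih =>
    intro xs hlen
    rw [time_since_last_peak_alt]
    split
    case _ p h =>
      obtain ⟨pre, suf, hxs, hplen, hpre⟩ := (PySem.List.index?_eq_some_iff xs 1 p).mp h
      have hslice : PySem.List.slice xs (some ((p : Int) + 1)) none = suf := by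
        have hcast : ((p : Int) + 1) = ((p + 1 : Nat) : Int) := by push_cast; ring
        rw [hcast, PySem.List.slice_from_natCast, hxs, ← hplen]
        simp
      have hsuflen : suf.length ≤ n := by
        have := congrArg List.length hxs
        simp at this
        omega
      rw [hslice, ih suf hsuflen, hxs, tslpGo_split pre 0 suf hpre, hplen,
        show (0 : Int) + 1 + (p : Int) = (p : Int) + 1 from by ring]
      norm_num
    case _ h =>
      have hmem : (1 : Int) ∉ xs := (PySem.List.index?_eq_none_iff xs 1).mp h
      rw [tslpGo_no_peak xs 0 hmem]
      congr 1
      ring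

-- ===== VERDICT (by name: the statement is the Claim_ definition above) =====
theorem time_since_last_peak_spec : Claim_equal_time_since_last_peak := by
  intro xs _
  show time_since_last_peak xs = time_since_last_peak_alt xs
  unfold time_since_last_peak
  rw [tslp_fold_eq_go xs 0 [], List.nil_append, tslp_alt_eq_go xs.length xs le_rfl]
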